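-- pv_equiv track=rewrite | github.com/clips/MBSP | tokenizer.py | balance_parenthesis
-- ===== SOURCE A (Python) =====
-- def balance_parenthesis(words, ignore="+"):
--     """ In split_punctuation() we split the trailing ")" from a word.
--         Put it back if the words contains "(", to balance the parenthesis, e.g.:
--         - Normal case: function (x) => function ( x )
--         - Balance: function(x) => function(x ) => function(x)
--         - Balance: (value from function(x)) => ( value from function(x) )
--     """
--     for i, word in enumerate(words):
--         if len(word) > 1 and not word.isalpha():
--             n = word.count("(")
--             m = word.count(")")
--             opened = n-m
--             for j in range(i+1, len(words)):
--                 # The ignore string defines punctuation between the word and the close parens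
--                 # that we can merge back into the word, for example in biomedical use:
--                 # L(4)Fe(DA(H+)) => L(4)Fe(DA(H + ) ) => L(4)Fe(DA(H+))
--                 if words[j] not in ")"+ignore or opened <= 0: break
--                 if words[j] == ")":
--                     opened -= 1
--                     words[i] += "".join(words[i+1:j+1])
--                     for k in range(i+1, j+1):
--                         words[k] = ""
--     return [word for word in words if word != ""]
-- ===== SOURCE B (Python) =====
-- def balance_parenthesis(words, ignore="+"):
--     """Single forward pass building a fresh output list (no in-place mutation):
--     for each gated word, scan ahead once to find the last close-paren it can
--     absorb, emit the merged word, and jump past the absorbed tokens."""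
--     close = ")" + ignore
--     out = []
--     i, n = 0, len(words)
--     while i < n:
--         w = words[i]
--         if len(w) > 1 and not w.isalpha():
--             opened = w.count("(") - w.count(")")
--             c, k = 0, 1  # c = offset of the last ")" merged back, 0 if none
--             while i + k < n and opened > 0 and words[i + k] in close:
--                 if words[i + k] == ")":
--                     opened -= 1
--                     c = k
--                 k += 1
--             out.append(w + "".join(words[i + 1:i + 1 + c]))
--             i += c
--         elif w:
--             out.append(w)
--         i += 1
--     return out
-- ===== Notes on version B (the rewrite author's own statement) =====
-- stated objective: alternative
-- what changed: B builds the result in a single forward pass that scans ahead once per word, appends everything up to the last matched ')' with one join, and jumps past the consumed tokens, instead of A's in-place mutation with repeated partial joins per ')', blanking consumed slots and filtering the blanks out at the end (A mutates its argument, B does not - the equivalence is about the return value).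
import Mathlib
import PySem

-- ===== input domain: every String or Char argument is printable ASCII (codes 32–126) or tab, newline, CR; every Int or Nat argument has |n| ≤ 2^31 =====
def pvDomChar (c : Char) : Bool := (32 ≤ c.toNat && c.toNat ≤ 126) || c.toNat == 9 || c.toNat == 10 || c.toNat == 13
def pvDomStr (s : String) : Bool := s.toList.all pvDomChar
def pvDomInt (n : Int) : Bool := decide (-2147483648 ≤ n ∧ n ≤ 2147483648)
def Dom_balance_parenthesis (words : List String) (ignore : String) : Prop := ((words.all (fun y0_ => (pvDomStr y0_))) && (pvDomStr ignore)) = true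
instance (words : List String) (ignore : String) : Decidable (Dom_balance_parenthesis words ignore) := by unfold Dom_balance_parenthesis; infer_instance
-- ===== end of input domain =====

-- B rebuilds the result in one forward pass over the input instead of mutating
-- `words` in place and filtering blanks at the end (alternative decomposition;
-- A mutates its argument, B does not: the equivalence proved is about the
-- RETURN value only).

-- ===== PORT A =====

-- the shared gate `len(word) > 1 and not word.isalpha()` (same expression in both sources)
def pvGate (w : String) : Bool := decide (1 < PySem.Str.len w) && !PySem.Str.strIsalpha w

-- `for k in range(i+1, j+1): words[k] = ""`
def pvBlank (ws : List String) (i j : Nat) : List String :=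
  (List.range' (i + 1) (j - i)).foldl (fun s k => s.set k "") ws

-- the inner `for j in range(i+1, len(words))` loop with its two breaks
def pvInnerA (ignore : String) (n i : Nat) (j : Nat) (ws : List String) (opened : Int) :
    List String :=
  if j < n then
    let wj := ws.getD j ""
    if PySem.Str.isIn wj (")" ++ ignore) = false ∨ opened ≤ 0 then ws
    else if wj = ")" then
      let ws1 := ws.set i (ws.getD i "" ++
        PySem.Str.join "" (PySem.List.slice ws (some ((i + 1 : Nat) : Int)) (some ((j + 1 : Nat) : Int))))
      pvInnerA ignore n i (j + 1) (pvBlank ws1 i j) (opened - 1)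
    else pvInnerA ignore n i (j + 1) ws opened
  else ws
termination_by n - j

-- one outer-loop step at index i
def pvStepA (ignore : String) (ws : List String) (i : Nat) : List String :=
  let word := ws.getD i ""
  if pvGate word then
    pvInnerA ignore ws.length i (i + 1) ws
      ((PySem.Str.count word "(" : Int) - (PySem.Str.count word ")" : Int))
  else ws

def balance_parenthesis (words : List String) (ignore : String) : List String :=
  ((List.range words.length).foldl (pvStepA ignore) words).filter (fun w => w ≠ "")

-- ===== PORT B =====

-- the scan `while i+k < n and opened > 0 and words[i+k] in close: ...` over the suffix
def pvScanB (close : String) : List String → Int → Nat → Nat → Nat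
  | [], _, _, c => c
  | x :: xs, opened, k, c =>
    if 0 < opened ∧ PySem.Str.isIn x (close) = true then
      if x = ")" then pvScanB close xs (opened - 1) (k + 1) k
      else pvScanB close xs opened (k + 1) c
    else c

-- the single forward pass: emit one word (merged or not), jump past what it absorbed
def pvEmit (close : String) : List String → List String
  | [] => []
  | w :: rest =>
    if pvGate w then
      let opened := (PySem.Str.count w "(" : Int) - (PySem.Str.count w ")" : Int)
      let c := pvScanB close rest opened 1 0
      (w ++ PySem.Str.join "" (rest.take c)) :: pvEmit close (rest.drop c)
    else if w ≠ "" then w :: pvEmit close rest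
    else pvEmit close rest
termination_by l => l.length
decreasing_by all_goals (simp only [List.length_drop, List.length_cons]; omega)

def balance_parenthesis_alt (words : List String) (ignore : String) : List String :=
  pvEmit (")" ++ ignore) words

-- ===== PRECONDITION & SPEC =====
def Spec_balance_parenthesis (words : List String) (ignore : String) (out : List String) : Prop := out = balance_parenthesis_alt words ignore
instance (words : List String) (ignore : String) (out : List String) : Decidable (Spec_balance_parenthesis words ignore out) := by unfold Spec_balance_parenthesis; infer_instance

-- ===== CLAIM (what is proved, stated in full; the proofs are below) =====
def Claim_equal_balance_parenthesis : Prop := ∀ (words : List String) (ignore : String), Dom_balance_parenthesis words ignore → Spec_balance_parenthesis words ignore (balance_parenthesis words ignore)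

-- ===== LEMMAS AND PROOFS =====

-- accumulator-free version of pvScanB, used only in the proofs
def pvCnt (close : String) : List String → Int → Nat
  | [], _ => 0
  | x :: xs, opened =>
    if 0 < opened ∧ PySem.Str.isIn x close = true then
      if x = ")" then pvCnt close xs (opened - 1) + 1
      else if pvCnt close xs opened = 0 then 0 else pvCnt close xs opened + 1
    else 0

lemma pvCnt_le_length (close : String) :
    ∀ (xs : List String) (opened : Int), pvCnt close xs opened ≤ xs.length := by
  intro xs
  induction xs with
  | nil => intro opened; simp [pvCnt]
  | cons x xs ih =>
    intro opened
    simp only [pvCnt, List.length_cons]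
    split_ifs with h1 h2 h3
    · have := ih (opened - 1); omega
    · omega
    · have := ih opened; omega
    · omega

lemma pvScanB_acc (close : String) :
    ∀ (xs : List String) (opened : Int) (k c : Nat), 1 ≤ k →
      pvScanB close xs opened k c =
        if pvCnt close xs opened = 0 then c else (k - 1) + pvCnt close xs opened := by
  intro xs
  induction xs with
  | nil => intro opened k c hk; simp [pvScanB, pvCnt]
  | cons x xs ih =>
    intro opened k c hk
    simp only [pvScanB, pvCnt]
    by_cases h1 : 0 < opened ∧ PySem.Str.isIn x close = true
    · rw [if_pos h1, if_pos h1]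
      by_cases h2 : x = ")"
      · rw [if_pos h2, if_pos h2, ih _ _ _ (by omega)]
        by_cases h0 : pvCnt close xs (opened - 1) = 0
        · simp [h0]; omega
        · rw [if_neg h0, if_neg (Nat.succ_ne_zero _)]; omega
      · rw [if_neg h2, if_neg h2, ih _ _ _ (by omega)]
        by_cases h0 : pvCnt close xs opened = 0
        · simp [h0]
        · simp [h0]; omega
    · rw [if_neg h1, if_neg h1]; simp

lemma pvScanB_eq_pvCnt (close : String) (xs : List String) (opened : Int) :
    pvScanB close xs opened 1 0 = pvCnt close xs opened := by
  rw [pvScanB_acc close xs opened 1 0 (by omega)]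
  split_ifs with h <;> omega

-- "".join with empty separator, on the char level
lemma pvJoin_cons (x : String) (l : List String) :
    PySem.Str.join "" (x :: l) = x ++ PySem.Str.join "" l := by
  rw [← String.toList_inj]
  cases l with
  | nil => simp [PySem.Str.toList_join, PySem.Chars.join_nil, PySem.Chars.join_singleton]
  | cons y r => simp [PySem.Str.toList_join, PySem.Chars.join_cons_cons]

lemma pvJoin_nil : PySem.Str.join "" [] = "" := by
  rw [← String.toList_inj]; simp [PySem.Str.toList_join, PySem.Chars.join_nil]

lemma pvJoin_append (l1 l2 : List String) :
    PySem.Str.join "" (l1 ++ l2) = PySem.Str.join "" l1 ++ PySem.Str.join "" l2 := by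
  induction l1 with
  | nil => simp [pvJoin_nil]
  | cons x l ih => simp [pvJoin_cons, ih, String.append_assoc]

lemma pvJoin_replicate (b : Nat) : PySem.Str.join "" (List.replicate b "") = "" := by
  induction b with
  | zero => simp [pvJoin_nil]
  | succ b ih => simp [List.replicate_succ, pvJoin_cons, ih]

lemma pvGate_ne_empty {w : String} (h : pvGate w = true) : w ≠ "" := by
  intro he; subst he; exact absurd h (by decide)

lemma pvAppend_ne_empty {w : String} (x : String) (h : w ≠ "") : w ++ x ≠ "" := by
  intro he
  apply h
  rw [← String.toList_inj] at he ⊢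
  simp at he ⊢
  exact he.1

lemma pvGetD_concat (p : List String) (x : String) (t : List String) :
    (p ++ x :: t).getD p.length "" = x := by
  induction p with
  | nil => simp
  | cons a p ih => simpa using ih

lemma pvSet_concat (p : List String) (x : String) (t : List String) (v : String) :
    (p ++ x :: t).set p.length v = p ++ v :: t := by
  induction p with
  | nil => simp
  | cons a p ih => simpa using ih

lemma pvBlank_spec :
    ∀ (mid p : List String) (w : String) (rest : List String),
      pvBlank (p ++ w :: (mid ++ rest)) p.length (p.length + mid.length)
        = p ++ w :: (List.replicate mid.length "" ++ rest) := by
  intro mid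
  induction mid with
  | nil => intro p w rest; simp [pvBlank]
  | cons y mid ih =>
    intro p w rest
    have h1 : p.length + (mid.length + 1) - p.length = mid.length + 1 := by omega
    simp only [pvBlank, List.length_cons, h1]
    rw [List.range'_succ]
    simp only [List.foldl_cons]
    have hset : (p ++ w :: (y :: mid ++ rest)).set (p.length + 1) ""
        = (p ++ [w]) ++ "" :: (mid ++ rest) := by
      have := pvSet_concat (p ++ [w]) y (mid ++ rest) ""
      simpa [List.append_assoc] using this
    have ihx := ih (p ++ [w]) "" rest
    simp only [pvBlank, List.length_append, List.length_cons, List.length_nil] at ihx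
    have h2 : p.length + 1 + mid.length - (p.length + 1) = mid.length := by omega
    rw [h2] at ihx
    calc (List.range' (p.length + 1 + 1) mid.length).foldl (fun s k => s.set k "")
            ((p ++ w :: (y :: mid ++ rest)).set (p.length + 1) "")
        = (List.range' (p.length + 1 + 1) mid.length).foldl (fun s k => s.set k "")
            ((p ++ [w]) ++ "" :: (mid ++ rest)) := by rw [hset]
      _ = (p ++ [w]) ++ "" :: (List.replicate mid.length "" ++ rest) := ihx
      _ = p ++ w :: (List.replicate (mid.length + 1) "" ++ rest) := by
            simp [List.append_assoc, List.replicate_succ]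

lemma pvInnerA_spec (ignore : String) (p : List String) :
    ∀ (rest pending : List String) (b : Nat) (w : String) (opened : Int),
      pvInnerA ignore (p.length + 1 + b + pending.length + rest.length) p.length
          (p.length + 1 + b + pending.length)
          (p ++ w :: (List.replicate b "" ++ (pending ++ rest))) opened
      = if pvCnt (")" ++ ignore) rest opened = 0 then
          p ++ w :: (List.replicate b "" ++ (pending ++ rest))
        else
          p ++ (w ++ PySem.Str.join "" pending
                  ++ PySem.Str.join "" (rest.take (pvCnt (")" ++ ignore) rest opened)))
            :: (List.replicate (b + pending.length + pvCnt (")" ++ ignore) rest opened) ""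
                ++ rest.drop (pvCnt (")" ++ ignore) rest opened)) := by
  intro rest
  induction rest with
  | nil =>
    intro pending b w opened
    rw [pvInnerA]
    simp [pvCnt]
  | cons x xs ih =>
    intro pending b w opened
    rw [pvInnerA]
    have hlt : p.length + 1 + b + pending.length
        < p.length + 1 + b + pending.length + (x :: xs).length := by simp
    rw [if_pos hlt]
    have hshape : p ++ w :: (List.replicate b "" ++ (pending ++ x :: xs))
        = (p ++ w :: (List.replicate b "" ++ pending)) ++ x :: xs := by
      simp [List.append_assoc]
    have hget : (p ++ w :: (List.replicate b "" ++ (pending ++ x :: xs))).getD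
        (p.length + 1 + b + pending.length) "" = x := by
      rw [hshape]
      have hl : (p ++ w :: (List.replicate b "" ++ pending)).length
          = p.length + 1 + b + pending.length := by simp; omega
      rw [← hl]
      exact pvGetD_concat _ x xs
    rw [hget]
    by_cases hbrk : PySem.Str.isIn x (")" ++ ignore) = false ∨ opened ≤ 0
    · rw [if_pos hbrk]
      have hc : pvCnt (")" ++ ignore) (x :: xs) opened = 0 := by
        rw [pvCnt, if_neg]
        rintro ⟨h1, h2⟩
        rcases hbrk with h | h
        · rw [h2] at h; exact absurd h (by decide)
        · omega
      rw [hc]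
      simp
    · push_neg at hbrk
      obtain ⟨hin, hop⟩ := hbrk
      have hin' : PySem.Str.isIn x (")" ++ ignore) = true := by
        cases hx : PySem.Str.isIn x (")" ++ ignore) with
        | false => exact absurd hx hin
        | true => rfl
      have hnb : ¬ (PySem.Str.isIn x (")" ++ ignore) = false ∨ opened ≤ 0) := by
        rintro (h | h)
        · exact hin h
        · omega
      rw [if_neg hnb]
      by_cases hx : x = ")"
      · rw [if_pos hx]
        -- the merge-and-blank step
        have hgetI : (p ++ w :: (List.replicate b "" ++ (pending ++ x :: xs))).getD p.length "" = w :=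
          pvGetD_concat p w _
        have hdrop : (p ++ w :: (List.replicate b "" ++ (pending ++ x :: xs))).drop (p.length + 1)
            = List.replicate b "" ++ (pending ++ x :: xs) := by
          have : p ++ w :: (List.replicate b "" ++ (pending ++ x :: xs))
              = (p ++ [w]) ++ (List.replicate b "" ++ (pending ++ x :: xs)) := by simp
          rw [this, List.drop_left' (by simp)]
        have hslice : PySem.List.slice (p ++ w :: (List.replicate b "" ++ (pending ++ x :: xs)))
            (some ((p.length + 1 : Nat) : Int))
            (some ((p.length + 1 + b + pending.length + 1 : Nat) : Int))
            = List.replicate b "" ++ (pending ++ [x]) := by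
          rw [PySem.List.slice_natCast, hdrop]
          have h2 : List.replicate b "" ++ (pending ++ x :: xs)
              = (List.replicate b "" ++ (pending ++ [x])) ++ xs := by simp
          rw [h2, List.take_left' (by simp; omega)]
        have hjoin : PySem.Str.join "" (List.replicate b "" ++ (pending ++ [x]))
            = PySem.Str.join "" pending ++ ")" := by
          rw [pvJoin_append, pvJoin_replicate, pvJoin_append, pvJoin_cons, pvJoin_nil, hx]
          simp
        have hset : (p ++ w :: (List.replicate b "" ++ (pending ++ x :: xs))).set p.length
            (w ++ (PySem.Str.join "" pending ++ ")"))
            = p ++ (w ++ (PySem.Str.join "" pending ++ ")")) :: (List.replicate b "" ++ (pending ++ x :: xs)) :=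
          pvSet_concat p w _ _
        have hblank : pvBlank
            (p ++ (w ++ (PySem.Str.join "" pending ++ ")")) :: (List.replicate b "" ++ (pending ++ x :: xs)))
            p.length (p.length + 1 + b + pending.length)
            = p ++ (w ++ (PySem.Str.join "" pending ++ ")")) ::
                (List.replicate (b + pending.length + 1) "" ++ xs) := by
          have hmid : List.replicate b "" ++ (pending ++ x :: xs)
              = (List.replicate b "" ++ (pending ++ [x])) ++ xs := by simp
          have hlen : (List.replicate b "" ++ (pending ++ [x])).length = b + pending.length + 1 := by
            simp; omega
          have := pvBlank_spec (List.replicate b "" ++ (pending ++ [x])) p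
            (w ++ (PySem.Str.join "" pending ++ ")")) xs
          rw [hlen] at this
          rw [hmid]
          have harg : p.length + (b + pending.length + 1) = p.length + 1 + b + pending.length := by omega
          rw [harg] at this
          exact this
        simp only [List.length_cons]
        rw [hgetI, hslice, hjoin, hset, hblank]
        have ihx := ih [] (b + pending.length + 1) (w ++ (PySem.Str.join "" pending ++ ")")) (opened - 1)
        simp only [List.length_nil, List.nil_append, Nat.add_zero] at ihx
        have e1 : p.length + 1 + (b + pending.length + 1) = p.length + 1 + b + pending.length + 1 := by
          omega
        rw [e1] at ihx
        have e2 : p.length + 1 + b + pending.length + (xs.length + 1)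
            = p.length + 1 + b + pending.length + 1 + xs.length := by omega
        rw [e2, ihx]
        have hcc : pvCnt (")" ++ ignore) (x :: xs) opened
            = pvCnt (")" ++ ignore) xs (opened - 1) + 1 := by
          rw [pvCnt, if_pos ⟨hop, hin'⟩, if_pos hx]
        rw [hcc, if_neg (Nat.succ_ne_zero _)]
        by_cases h0 : pvCnt (")" ++ ignore) xs (opened - 1) = 0
        · rw [if_pos h0, h0]
          have e3 : b + pending.length + (0 + 1) = b + pending.length + 1 := by omega
          simp [hx, pvJoin_cons, pvJoin_nil, String.append_assoc, e3]
        · rw [if_neg h0]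
          have e4 : b + pending.length + 1 + 0 + pvCnt (")" ++ ignore) xs (opened - 1)
              = b + pending.length + (pvCnt (")" ++ ignore) xs (opened - 1) + 1) := by omega
          simp [hx, pvJoin_cons, pvJoin_nil, String.append_assoc, e4, List.take_succ_cons,
            List.drop_succ_cons]
      · rw [if_neg hx]
        simp only [List.length_cons]
        have hre : p ++ w :: (List.replicate b "" ++ (pending ++ x :: xs))
            = p ++ w :: (List.replicate b "" ++ ((pending ++ [x]) ++ xs)) := by
          simp [List.append_assoc]
        rw [hre]
        have ihx := ih (pending ++ [x]) b w opened
        simp only [List.length_append, List.length_cons, List.length_nil] at ihx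
        have e1 : p.length + 1 + b + (pending.length + 1)
            = p.length + 1 + b + pending.length + 1 := by omega
        rw [e1] at ihx
        have e2 : p.length + 1 + b + pending.length + (xs.length + 1)
            = p.length + 1 + b + pending.length + 1 + xs.length := by omega
        rw [e2, ihx]
        have hcc : pvCnt (")" ++ ignore) (x :: xs) opened
            = if pvCnt (")" ++ ignore) xs opened = 0 then 0 else pvCnt (")" ++ ignore) xs opened + 1 := by
          rw [pvCnt, if_pos ⟨hop, hin'⟩, if_neg hx]
        rw [hcc]
        by_cases h0 : pvCnt (")" ++ ignore) xs opened = 0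
        · rw [if_pos h0, h0]
          simp [List.append_assoc]
        · rw [if_neg h0, if_neg h0, if_neg (by simp [h0])]
          have e4 : b + (pending.length + 1) + pvCnt (")" ++ ignore) xs opened
              = b + pending.length + (pvCnt (")" ++ ignore) xs opened + 1) := by omega
          simp [pvJoin_append, pvJoin_cons, pvJoin_nil, String.append_assoc, e4,
            List.take_succ_cons, List.drop_succ_cons]

lemma pvSteps_blank (ignore : String) :
    ∀ (c : Nat) (p : List String) (m : String) (u : List String),
      (List.range' (p.length + 1) c).foldl (pvStepA ignore)
          (p ++ m :: (List.replicate c "" ++ u))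
        = p ++ m :: (List.replicate c "" ++ u) := by
  intro c
  induction c with
  | zero => intro p m u; simp
  | succ c ih =>
    intro p m u
    rw [List.range'_succ]
    simp only [List.foldl_cons]
    have hget : (p ++ m :: (List.replicate (c + 1) "" ++ u)).getD (p.length + 1) "" = "" := by
      have := pvGetD_concat (p ++ [m]) "" (List.replicate c "" ++ u)
      simpa [List.append_assoc, List.replicate_succ] using this
    have hstep : pvStepA ignore (p ++ m :: (List.replicate (c + 1) "" ++ u)) (p.length + 1)
        = p ++ m :: (List.replicate (c + 1) "" ++ u) := by
      simp only [pvStepA, hget]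
      norm_num [pvGate]
    rw [hstep]
    have ihx := ih (p ++ [m]) "" u
    simp only [List.length_append, List.length_cons, List.length_nil] at ihx
    calc (List.range' (p.length + 1 + 1) c).foldl (pvStepA ignore)
            (p ++ m :: (List.replicate (c + 1) "" ++ u))
        = (List.range' (p.length + 1 + 1) c).foldl (pvStepA ignore)
            ((p ++ [m]) ++ "" :: (List.replicate c "" ++ u)) := by
            simp [List.append_assoc, List.replicate_succ]
      _ = (p ++ [m]) ++ "" :: (List.replicate c "" ++ u) := by simpa using ihx
      _ = p ++ m :: (List.replicate (c + 1) "" ++ u) := by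
            simp [List.append_assoc, List.replicate_succ]

lemma pvOuter_spec (ignore : String) :
    ∀ (N : Nat) (t p : List String), t.length ≤ N →
      ((List.range' p.length t.length).foldl (pvStepA ignore) (p ++ t)).filter (fun w => w ≠ "")
        = p.filter (fun w => w ≠ "") ++ pvEmit (")" ++ ignore) t := by
  intro N
  induction N with
  | zero =>
    intro t p h
    have ht : t = [] := List.eq_nil_of_length_eq_zero (by omega)
    subst ht
    simp [pvEmit]
  | succ N ih =>
    intro t p h
    cases t with
    | nil => simp [pvEmit]
    | cons w rest =>
      simp only [List.length_cons] at h
      simp only [List.length_cons]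
      rw [List.range'_succ, List.foldl_cons]
      simp only [pvStepA, pvGetD_concat]
      by_cases hg : pvGate w
      · rw [if_pos hg]
        have eN : (p ++ w :: rest).length = p.length + 1 + rest.length := by simp; omega
        rw [eN]
        have hspec := pvInnerA_spec ignore p rest [] 0 w
          ((PySem.Str.count w "(" : Int) - (PySem.Str.count w ")" : Int))
        simp only [List.replicate_zero, List.nil_append, List.length_nil, Nat.add_zero,
          pvJoin_nil, Nat.zero_add, String.append_empty, List.append_nil] at hspec
        rw [hspec]
        have hw : w ≠ "" := pvGate_ne_empty hg
        by_cases h0 : pvCnt (")" ++ ignore) rest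
            ((PySem.Str.count w "(" : Int) - (PySem.Str.count w ")" : Int)) = 0
        · rw [if_pos h0]
          have ihx := ih rest (p ++ [w]) (by omega)
          simp only [List.length_append, List.length_cons, List.length_nil,
            List.append_assoc, List.cons_append, List.nil_append] at ihx
          rw [ihx]
          simp only [pvEmit, hg, if_true, pvScanB_eq_pvCnt, h0]
          simp [List.filter_append, hw, pvJoin_nil]
        · rw [if_neg h0]
          have hm : w ++ PySem.Str.join ""
              (rest.take (pvCnt (")" ++ ignore) rest
                ((PySem.Str.count w "(" : Int) - (PySem.Str.count w ")" : Int)))) ≠ "" :=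
            pvAppend_ne_empty _ hw
          have hcle := pvCnt_le_length (")" ++ ignore) rest
            ((PySem.Str.count w "(" : Int) - (PySem.Str.count w ")" : Int))
          -- split the remaining index range at the last blanked position
          have hlen : rest.length = pvCnt (")" ++ ignore) rest
              ((PySem.Str.count w "(" : Int) - (PySem.Str.count w ")" : Int))
              + (rest.length - pvCnt (")" ++ ignore) rest
                ((PySem.Str.count w "(" : Int) - (PySem.Str.count w ")" : Int))) := by omega
          rw [hlen, ← List.range'_append, List.foldl_append]
          simp only [Nat.one_mul]
          rw [pvSteps_blank]
          have ihx := ih (rest.drop (pvCnt (")" ++ ignore) rest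
              ((PySem.Str.count w "(" : Int) - (PySem.Str.count w ")" : Int))))
            (p ++ (w ++ PySem.Str.join ""
              (rest.take (pvCnt (")" ++ ignore) rest
                ((PySem.Str.count w "(" : Int) - (PySem.Str.count w ")" : Int)))))
              :: List.replicate (pvCnt (")" ++ ignore) rest
                ((PySem.Str.count w "(" : Int) - (PySem.Str.count w ")" : Int))) "")
            (by simp only [List.length_drop]; omega)
          simp only [List.length_append, List.length_cons, List.length_nil,
            List.length_replicate, List.length_drop, List.append_assoc, List.cons_append,
            List.nil_append] at ihx
          have eS : p.length + 1 + pvCnt (")" ++ ignore) rest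
              ((PySem.Str.count w "(" : Int) - (PySem.Str.count w ")" : Int))
              = p.length + (pvCnt (")" ++ ignore) rest
                ((PySem.Str.count w "(" : Int) - (PySem.Str.count w ")" : Int)) + 1) := by omega
          rw [eS, ihx]
          simp only [pvEmit, hg, if_true, pvScanB_eq_pvCnt]
          simp [List.filter_append, hw, hm, List.filter_replicate]
      · rw [if_neg hg]
        have ihx := ih rest (p ++ [w]) (by omega)
        simp only [List.length_append, List.length_cons, List.length_nil,
          List.append_assoc, List.cons_append, List.nil_append] at ihx
        rw [ihx]
        simp only [Bool.not_eq_true] at hg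
        simp only [pvEmit, hg, Bool.false_eq_true, if_false]
        by_cases hw : w = ""
        · subst hw; simp
        · simp [List.filter_append, hw]

-- ===== VERDICT (by name: the statement is the Claim_ definition above) =====
theorem balance_parenthesis_spec : Claim_equal_balance_parenthesis := by
  intro words ignore _
  unfold Spec_balance_parenthesis balance_parenthesis balance_parenthesis_alt
  have h := pvOuter_spec ignore words.length words [] (le_refl _)
  simpa [List.range_eq_range'] using h
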